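-- pv_equiv track=rewrite | github.com/YvonneFbb/DataVis | song-ocr/fix_split.py | dripDropMethod
-- ===== SOURCE A (Python) =====
-- def dripDropMethod(projection, threshold=1):
--     """
--     Apply the drip-drop method to find start and end positions in the projection.
--     Use a threshold to control the start detection of a new segment.
--     """
--     start_positions = []
--     end_positions = []
--     is_segment = False
--
--     for i in range(len(projection)):
--         if projection[i] > threshold and not is_segment:
--             start_positions.append(i)
--             is_segment = True
--         elif projection[i] <= threshold and is_segment:
--             end_positions.append(i)
--             is_segment = False
--
--     if is_segment:
--         end_positions.append(len(projection) - 1)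
--
--     return start_positions, end_positions
-- ===== SOURCE B (Python) =====
-- def dripDropMethod(projection, threshold=1):
--     # Run decomposition: first split the boolean mask (p > threshold) into
--     # maximal runs (value, start index), then read segment boundaries off the
--     # run list: each True run starts a segment; its end is the start of the
--     # following run (a False run), or len-1 when the True run reaches the end.
--     n = len(projection)
--     runs = []  # (value, start) of each maximal run of the mask
--     prev = None
--     for i, p in enumerate(projection):
--         v = p > threshold
--         if v != prev:
--             runs.append((v, i))
--         prev = v
--     starts, ends = [], []
--     for k, (v, s) in enumerate(runs):
--         if v:
--             starts.append(s)
--             ends.append(runs[k + 1][1] if k + 1 < len(runs) else n - 1)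
--     return starts, ends
-- ===== Notes on version B (the rewrite author's own statement) =====
-- stated objective: alternative
-- what changed: Replaces the flag-toggling single loop with a run decomposition: build the list of maximal runs of the boolean mask (value, start index), then read each segment's start from its True run and its end from the next run's start (or len-1 for a terminal run).
import Mathlib
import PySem

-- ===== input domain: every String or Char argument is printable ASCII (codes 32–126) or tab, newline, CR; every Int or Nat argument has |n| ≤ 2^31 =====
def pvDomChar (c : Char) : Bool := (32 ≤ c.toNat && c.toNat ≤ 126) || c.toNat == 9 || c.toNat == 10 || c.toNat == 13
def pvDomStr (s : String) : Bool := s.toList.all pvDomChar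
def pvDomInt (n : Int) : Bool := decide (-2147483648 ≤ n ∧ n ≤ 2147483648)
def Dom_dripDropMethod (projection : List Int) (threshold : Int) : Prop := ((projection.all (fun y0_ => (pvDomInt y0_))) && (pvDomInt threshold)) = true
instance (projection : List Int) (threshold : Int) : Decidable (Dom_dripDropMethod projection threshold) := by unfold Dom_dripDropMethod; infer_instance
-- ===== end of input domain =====

-- B replaces A's flag-driven loop by a run decomposition of the threshold mask; alternative (same cost).

-- ===== PORT A =====
-- the for-loop of A as structural recursion over the list, carrying (index, starts, ends, is_segment)
def pvLoopA (th : Int) : List Int → Int → List Int → List Int → Bool → List Int × List Int × Bool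
  | [], _, ss, es, seg => (ss, es, seg)
  | p :: rest, i, ss, es, seg =>
    if p > th ∧ seg = false then pvLoopA th rest (i + 1) (ss ++ [i]) es true
    else if p ≤ th ∧ seg = true then pvLoopA th rest (i + 1) ss (es ++ [i]) false
    else pvLoopA th rest (i + 1) ss es seg

def dripDropMethod (projection : List Int) (threshold : Int) : List Int × List Int :=
  let r := pvLoopA threshold projection 0 [] [] false
  if r.2.2 then (r.1, r.2.1 ++ [(projection.length : Int) - 1]) else (r.1, r.2.1)

-- ===== PORT B =====
-- phase 1 of Source B: the maximal runs (value, start index) of the mask p > threshold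
def pvRuns (th : Int) : Option Bool → List Int → Int → List (Bool × Int)
  | _, [], _ => []
  | prev, p :: rest, i =>
    let v : Bool := decide (p > th)
    if some v = prev then pvRuns th (some v) rest (i + 1)
    else (v, i) :: pvRuns th (some v) rest (i + 1)

-- phase 2 of Source B: starts from True runs, ends from the next run's start (or n-1 at the tail)
def pvCollect (n : Int) : List (Bool × Int) → List Int × List Int
  | [] => ([], [])
  | (v, s) :: rest =>
    let r := pvCollect n rest
    if v then (s :: r.1, (match rest with | [] => n - 1 | (_, s') :: _ => s') :: r.2) else r

def dripDropMethod_alt (projection : List Int) (threshold : Int) : List Int × List Int :=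
  pvCollect (projection.length : Int) (pvRuns threshold none projection 0)

-- ===== PRECONDITION & SPEC =====
def Spec_dripDropMethod (projection : List Int) (threshold : Int) (out : List Int × List Int) : Prop := out = dripDropMethod_alt projection threshold
instance (projection : List Int) (threshold : Int) (out : List Int × List Int) : Decidable (Spec_dripDropMethod projection threshold out) := by unfold Spec_dripDropMethod; infer_instance

-- ===== CLAIM (what is proved, stated in full; the proofs are below) =====
def Claim_equal_dripDropMethod : Prop := ∀ (projection : List Int) (threshold : Int), Dom_dripDropMethod projection threshold → Spec_dripDropMethod projection threshold (dripDropMethod projection threshold)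

-- ===== LEMMAS AND PROOFS =====

-- the pending end of a currently open segment: first index at/below threshold, else n-1
def pvPend (th n : Int) : List Int → Int → Int
  | [], _ => n - 1
  | p :: rest, i => if p > th then pvPend th n rest (i + 1) else i

lemma pvPendHead (th n : Int) : ∀ (l : List Int) (i : Int),
    (match pvRuns th (some true) l i with | [] => n - 1 | (_, s) :: _ => s) = pvPend th n l i := by
  intro l
  induction l with
  | nil => intro i; simp [pvRuns, pvPend]
  | cons p rest ih =>
    intro i
    by_cases hp : p > th
    · simp [pvRuns, pvPend, hp, ih]
    · simp [pvRuns, pvPend, hp]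

lemma pvMain (th n : Int) : ∀ (l : List Int) (i : Int) (ss es : List Int) (seg : Bool) (cur : Option Bool),
    (cur = some true ↔ seg = true) →
    (let r := pvLoopA th l i ss es seg
     if r.2.2 then (r.1, r.2.1 ++ [n - 1]) else (r.1, r.2.1)) =
    (ss ++ (pvCollect n (pvRuns th cur l i)).1,
     es ++ (if seg then pvPend th n l i :: (pvCollect n (pvRuns th cur l i)).2
            else (pvCollect n (pvRuns th cur l i)).2)) := by
  intro l
  induction l with
  | nil =>
    intro i ss es seg cur _
    cases seg <;> simp [pvLoopA, pvRuns, pvCollect, pvPend]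
  | cons p rest ih =>
    intro i ss es seg cur hcur
    by_cases hp : p > th
    · cases seg with
      | false =>
        have hc : cur ≠ some true := by
          intro h; exact absurd (hcur.mp h) (by simp)
        have step : pvLoopA th (p :: rest) i ss es false
            = pvLoopA th rest (i + 1) (ss ++ [i]) es true := by
          simp [pvLoopA, hp]
        have hruns : pvRuns th cur (p :: rest) i
            = (true, i) :: pvRuns th (some true) rest (i + 1) := by
          cases cur with
          | none => simp [pvRuns, hp]
          | some b =>
            cases b with
            | true => exact absurd rfl hc
            | false => simp [pvRuns, hp]
        have := ih (i + 1) (ss ++ [i]) es true (some true) (by simp)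
        simp only [step, hruns, pvCollect, if_pos, this]
        have hhead := pvPendHead th n rest (i + 1)
        simp [hhead]
      | true =>
        have hc : cur = some true := hcur.mpr rfl
        have step : pvLoopA th (p :: rest) i ss es true
            = pvLoopA th rest (i + 1) ss es true := by
          have : ¬(p ≤ th ∧ True) := by simp; omega
          simp [pvLoopA, hp, not_le.mpr hp]
        have hruns : pvRuns th cur (p :: rest) i
            = pvRuns th (some true) rest (i + 1) := by
          subst hc; simp [pvRuns, hp]
        have := ih (i + 1) ss es true (some true) (by simp)
        simp only [step, hruns, this]
        simp [pvPend, hp]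
    · cases seg with
      | true =>
        have hc : cur = some true := hcur.mpr rfl
        have step : pvLoopA th (p :: rest) i ss es true
            = pvLoopA th rest (i + 1) ss (es ++ [i]) false := by
          simp [pvLoopA, hp]
        have hruns : pvRuns th cur (p :: rest) i
            = (false, i) :: pvRuns th (some false) rest (i + 1) := by
          subst hc; simp [pvRuns, hp]
        have := ih (i + 1) ss (es ++ [i]) false (some false) (by simp)
        simp only [step, hruns, pvCollect, this]
        simp [pvPend, hp]
      | false =>
        have hc : cur ≠ some true := by
          intro h; exact absurd (hcur.mp h) (by simp)
        have step : pvLoopA th (p :: rest) i ss es false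
            = pvLoopA th rest (i + 1) ss es false := by
          simp [pvLoopA, hp]
        have hcollect : pvCollect n (pvRuns th cur (p :: rest) i)
            = pvCollect n (pvRuns th (some false) rest (i + 1)) := by
          cases cur with
          | none => simp [pvRuns, hp, pvCollect]
          | some b =>
            cases b with
            | true => exact absurd rfl hc
            | false => simp [pvRuns, hp]
        have := ih (i + 1) ss es false (some false) (by simp)
        simp only [step, hcollect, this]
        simp

-- ===== VERDICT (by name: the statement is the Claim_ definition above) =====
theorem dripDropMethod_spec : Claim_equal_dripDropMethod := by
  intro projection threshold _
  unfold Spec_dripDropMethod dripDropMethod dripDropMethod_alt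
  have := pvMain threshold (projection.length : Int) projection 0 [] [] false none (by simp)
  simpa using this
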